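-- pv_equiv track=rewrite | github.com/Ishimov/test_task | parse_byte_data_sensor.py | parse_bytes_packets
-- ===== SOURCE A (Python) =====
-- def parse_bytes_packets(data):
--     """
--     Разбирает байтовый массив на пакеты данных.
--
--     :param data: Байтовый массив данных.
--     :return: Список пакетов данных.
--     """
--     packets, packet = [], []
--     for byte in data:
--         if byte == 0x80 or len(packet) == 4:
--             packets.append(packet)
--             packet = []
--         packet.append(byte)
--     packets.append(packet)
--     return packets
-- ===== SOURCE B (Python) =====
-- def _chunks4(seg):
--     return [seg[i:i + 4] for i in range(0, len(seg), 4)]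
--
--
-- def parse_bytes_packets(data):
--     # pass 1: split into segments, each 0x80 starting a new segment (kept with it)
--     segments, current = [], []
--     for b in data:
--         if b == 0x80:
--             segments.append(current)
--             current = [b]
--         else:
--             current.append(b)
--     segments.append(current)
--     # pass 2: chunk each segment into groups of 4; an empty segment (only the
--     # leading one can be empty) still yields one empty packet
--     return [packet for seg in segments for packet in (_chunks4(seg) or [[]])]
-- ===== Notes on version B (the rewrite author's own statement) =====
-- stated objective: alternative
-- what changed: A's single state machine (which decides packet breaks by delimiter OR current length inline) is replaced by two passes: split on the 0x80 delimiter into segments, then chunk each segment into groups of 4, with an empty segment yielding one empty packet.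
import Mathlib
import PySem

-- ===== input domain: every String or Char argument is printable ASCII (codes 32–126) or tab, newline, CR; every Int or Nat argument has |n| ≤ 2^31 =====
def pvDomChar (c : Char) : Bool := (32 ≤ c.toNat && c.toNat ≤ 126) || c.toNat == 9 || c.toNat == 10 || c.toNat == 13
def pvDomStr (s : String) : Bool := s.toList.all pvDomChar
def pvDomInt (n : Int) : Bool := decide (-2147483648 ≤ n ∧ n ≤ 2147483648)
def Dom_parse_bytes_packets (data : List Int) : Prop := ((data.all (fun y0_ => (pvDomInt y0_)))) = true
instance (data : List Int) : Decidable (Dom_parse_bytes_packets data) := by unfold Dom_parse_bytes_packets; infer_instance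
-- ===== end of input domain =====

-- B replaces A's single state machine by a split-on-delimiter pass followed by a chunk-into-4s pass (same cost).

-- ===== PORT A =====
-- literal port of A's loop: state (packets, packet); 'byte == 0x80 or len(packet) == 4'
def parse_bytes_packets (data : List Int) : List (List Int) :=
  let st := data.foldl (fun (s : List (List Int) × List Int) byte =>
    if byte = 0x80 ∨ s.2.length = 4 then
      (s.1 ++ [s.2], [byte])
    else
      (s.1, s.2 ++ [byte])) ([], [])
  st.1 ++ [st.2]

-- ===== PORT B =====
-- port of Source B's _chunks4: [seg[i:i+4] for i in range(0, len(seg), 4)]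
def pychunks4 (seg : List Int) : List (List Int) :=
  (PySem.List.pyRange 0 (seg.length : Int) 4).map
    (fun i => PySem.List.slice seg (some i) (some (i + 4)))

-- port of Source B: split into segments at each 0x80 (kept with it), then chunk each
-- segment; `_chunks4(seg) or [[]]` becomes the if on chunks4 seg = []
def parse_bytes_packets_alt (data : List Int) : List (List Int) :=
  let st := data.foldl (fun (s : List (List Int) × List Int) b =>
    if b = 0x80 then (s.1 ++ [s.2], [b]) else (s.1, s.2 ++ [b])) ([], [])
  (st.1 ++ [st.2]).flatMap (fun seg => if pychunks4 seg = [] then [[]] else pychunks4 seg)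

-- ===== PRECONDITION & SPEC =====
def Spec_parse_bytes_packets (data : List Int) (out : List (List Int)) : Prop := out = parse_bytes_packets_alt data
instance (data : List Int) (out : List (List Int)) : Decidable (Spec_parse_bytes_packets data out) := by unfold Spec_parse_bytes_packets; infer_instance

-- ===== CLAIM (what is proved, stated in full; the proofs are below) =====
def Claim_equal_parse_bytes_packets : Prop := ∀ (data : List Int), Dom_parse_bytes_packets data → Spec_parse_bytes_packets data (parse_bytes_packets data)

-- ===== LEMMAS AND PROOFS =====

-- recursive chunking into groups of 4 (proof-side form of _chunks4)
def chunks4 (seg : List Int) : List (List Int) :=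
  if h : seg = [] then [] else seg.take 4 :: chunks4 (seg.drop 4)
termination_by seg.length
decreasing_by
  simp only [List.length_drop]
  have : 0 < seg.length := List.length_pos_iff.mpr h
  omega

theorem rangeChunks : ∀ (c : ℕ) (seg : List Int), c = (seg.length + 3) / 4 →
    (List.range c).map (fun k => (seg.drop (4 * k)).take 4) = chunks4 seg := by
  intro c
  induction c with
  | zero =>
    intro seg hc
    have h0 : seg.length = 0 := by omega
    have : seg = [] := List.eq_nil_of_length_eq_zero h0
    subst this
    rw [chunks4, dif_pos rfl]
    rfl
  | succ c ih =>
    intro seg hc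
    have hpos : 0 < seg.length := by omega
    have hne : seg ≠ [] := by
      intro h; subst h; simp at hpos
    rw [List.range_succ_eq_map, List.map_cons, List.map_map, chunks4, dif_neg hne]
    have h2 : ((fun k => (seg.drop (4 * k)).take 4) ∘ Nat.succ)
        = (fun k => ((seg.drop 4).drop (4 * k)).take 4) := by
      funext k
      simp only [Function.comp, Nat.succ_eq_add_one, List.drop_drop]
      ring_nf
    rw [h2, ih (seg.drop 4) (by simp only [List.length_drop]; omega)]
    simp

theorem pychunks4_eq (seg : List Int) : pychunks4 seg = chunks4 seg := by
  rw [pychunks4, PySem.List.pyRange_of_pos 0 (seg.length : Int) (by norm_num)]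
  by_cases h0 : seg.length = 0
  · have : seg = [] := List.eq_nil_of_length_eq_zero h0
    subst this
    rw [chunks4, dif_pos rfl]
    simp
  · rw [if_pos (by exact_mod_cast Nat.pos_of_ne_zero h0)]
    have hcnt : (((seg.length : Int) - 0 + 4 - 1) / 4).toNat = (seg.length + 3) / 4 := by
      omega
    rw [hcnt, List.map_map, ← rangeChunks ((seg.length + 3) / 4) seg rfl]
    apply List.map_congr_left
    intro k _
    have : (0 : Int) + 4 * (k : Int) = ((4 * k : ℕ) : Int) := by push_cast; ring
    rw [Function.comp, this, show ((4 * k : ℕ) : Int) + 4 = ((4 * k : ℕ) : Int) + ((4 : ℕ) : Int) by norm_num,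
      PySem.List.slice_natCast_add seg (4 * k) 4]

-- recursive forms of the two loops
def goA (p : List Int) : List Int → List (List Int)
  | [] => [p]
  | b :: r => if b = 0x80 ∨ p.length = 4 then p :: goA [b] r else goA (p ++ [b]) r

def goS (c : List Int) : List Int → List (List Int)
  | [] => [c]
  | b :: r => if b = 0x80 then c :: goS [b] r else goS (c ++ [b]) r

theorem foldA_eq (data : List Int) : ∀ (packets : List (List Int)) (packet : List Int),
    (data.foldl (fun (s : List (List Int) × List Int) byte =>
      if byte = 0x80 ∨ s.2.length = 4 then (s.1 ++ [s.2], [byte]) else (s.1, s.2 ++ [byte]))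
      (packets, packet)).1
    ++ [(data.foldl (fun (s : List (List Int) × List Int) byte =>
      if byte = 0x80 ∨ s.2.length = 4 then (s.1 ++ [s.2], [byte]) else (s.1, s.2 ++ [byte]))
      (packets, packet)).2]
    = packets ++ goA packet data := by
  induction data with
  | nil => intro packets packet; simp [goA]
  | cons b r ih =>
    intro packets packet
    simp only [List.foldl_cons]
    by_cases h : b = 0x80 ∨ packet.length = 4
    · rw [if_pos h, ih, goA, if_pos h]; simp
    · rw [if_neg h, ih, goA, if_neg h]

theorem foldS_eq (data : List Int) : ∀ (segs : List (List Int)) (cur : List Int),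
    (data.foldl (fun (s : List (List Int) × List Int) b =>
      if b = 0x80 then (s.1 ++ [s.2], [b]) else (s.1, s.2 ++ [b])) (segs, cur)).1
    ++ [(data.foldl (fun (s : List (List Int) × List Int) b =>
      if b = 0x80 then (s.1 ++ [s.2], [b]) else (s.1, s.2 ++ [b])) (segs, cur)).2]
    = segs ++ goS cur data := by
  induction data with
  | nil => intro segs cur; simp [goS]
  | cons b r ih =>
    intro segs cur
    simp only [List.foldl_cons]
    by_cases h : b = 0x80
    · rw [if_pos h, ih, goS, if_pos h]; simp
    · rw [if_neg h, ih, goS, if_neg h]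

-- chunks4 on a join of full chunks followed by a short nonempty tail
theorem chunks4_join (F : List (List Int)) (p : List Int)
    (hF : ∀ q ∈ F, q.length = 4) (hp : p ≠ []) (hl : p.length ≤ 4) :
    chunks4 (F.flatten ++ p) = F ++ [p] := by
  induction F with
  | nil =>
    simp only [List.flatten_nil, List.nil_append]
    rw [chunks4, dif_neg hp, List.take_of_length_le hl,
      List.drop_eq_nil_of_le hl, chunks4, dif_pos rfl]
  | cons q F ih =>
    have hq : q.length = 4 := hF q (by simp)
    rw [List.flatten_cons, List.append_assoc, chunks4,
      dif_neg (by simp [hp]),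
      List.take_append_of_le_length (by omega), List.take_of_length_le (by omega),
      List.drop_append_of_le_length (by omega), show q.drop 4 = [] from
        List.drop_eq_nil_of_le (by omega)]
    rw [List.nil_append, ih (fun x hx => hF x (by simp [hx]))]
    rfl

-- core invariant: A's loop continued with partial packet p equals chunking the
-- segments of the rest, F being the full chunks already cut from the current segment
theorem main_inv (data : List Int) : ∀ (F : List (List Int)) (p : List Int),
    (∀ q ∈ F, q.length = 4) → p ≠ [] → p.length ≤ 4 →
    (goS (F.flatten ++ p) data).flatMap chunks4 = F ++ goA p data := by
  induction data with
  | nil =>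
    intro F p hF hp hl
    simp [goS, goA, chunks4_join F p hF hp hl]
  | cons b r ih =>
    intro F p hF hp hl
    by_cases hb : b = 0x80
    · rw [goS, if_pos hb, goA, if_pos (Or.inl hb)]
      have h1 := ih [] [b] (by simp) (by simp) (by simp)
      simp only [List.flatten_nil, List.nil_append] at h1
      rw [List.flatMap_cons, chunks4_join F p hF hp hl, h1]
      simp
    · by_cases h4 : p.length = 4
      · rw [goS, if_neg hb, goA, if_pos (Or.inr h4)]
        rw [show F.flatten ++ p ++ [b] = (F ++ [p]).flatten ++ [b] by simp]
        rw [ih (F ++ [p]) [b]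
          (by intro q hq
              rcases List.mem_append.mp hq with h | h
              · exact hF q h
              · simp at h; simp [h, h4]) (by simp) (by simp)]
        simp
      · rw [goS, if_neg hb, goA, if_neg (by rintro (h | h) <;> [exact hb h; exact h4 h])]
        rw [List.append_assoc]
        exact ih F (p ++ [b]) hF (by simp) (by simp; omega)

-- every segment produced from a nonempty current segment is nonempty
theorem goS_ne (data : List Int) : ∀ (c : List Int), c ≠ [] →
    ∀ s ∈ goS c data, s ≠ [] := by
  induction data with
  | nil => intro c hc s hs; simp [goS] at hs; simpa [hs]
  | cons b r ih =>
    intro c hc s hs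
    by_cases hb : b = 0x80
    · rw [goS, if_pos hb] at hs
      rcases List.mem_cons.mp hs with h | h
      · simpa [h]
      · exact ih [b] (by simp) s h
    · rw [goS, if_neg hb] at hs
      exact ih (c ++ [b]) (by simp) s hs

-- on nonempty segments, Source B's `or [[]]` fallback never fires
theorem flatMap_expand (L : List (List Int)) (hL : ∀ s ∈ L, s ≠ []) :
    L.flatMap (fun seg => if pychunks4 seg = [] then [[]] else pychunks4 seg)
    = L.flatMap chunks4 := by
  simp only [pychunks4_eq]
  induction L with
  | nil => rfl
  | cons s L ih =>
    have hs : chunks4 s ≠ [] := by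
      rw [chunks4, dif_neg (hL s (by simp))]; simp
    rw [List.flatMap_cons, List.flatMap_cons, if_neg hs,
      ih (fun x hx => hL x (by simp [hx]))]

-- ===== VERDICT (by name: the statement is the Claim_ definition above) =====
theorem parse_bytes_packets_spec : Claim_equal_parse_bytes_packets := by
  intro data _
  show parse_bytes_packets data = parse_bytes_packets_alt data
  simp only [parse_bytes_packets, parse_bytes_packets_alt]
  rw [foldA_eq data [] [], foldS_eq data [] []]
  simp only [List.nil_append]
  cases data with
  | nil =>
    have hc : pychunks4 [] = [] := by rw [pychunks4_eq, chunks4]; rfl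
    simp [goA, goS, hc]
  | cons b r =>
    by_cases hb : b = 0x80
    · rw [goA, if_pos (Or.inl hb), goS, if_pos hb, List.flatMap_cons,
        flatMap_expand _ (goS_ne r [b] (by simp))]
      have h1 := main_inv r [] [b] (by simp) (by simp) (by simp)
      simp only [List.flatten_nil, List.nil_append] at h1
      rw [h1]
      have hc : pychunks4 [] = [] := by rw [pychunks4_eq, chunks4]; rfl
      simp [hc]
    · rw [goA, if_neg (by simp [hb]), goS, if_neg hb, List.nil_append,
        flatMap_expand _ (goS_ne r [b] (by simp))]
      have h1 := main_inv r [] [b] (by simp) (by simp) (by simp)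
      simpa using h1.symm
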